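-- pv_equiv track=rewrite | github.com/aviral-bhardwaj/Coding-challenges-for-Interviews | Google_First_round/google.py | function
-- ===== SOURCE A (Python) =====
-- from collections import defaultdict
--
-- def function(l):
-- 	d=defaultdict(lambda:0)
-- 	for i in l:
-- 		l_name,domain=i.split('@')
-- 		e_l=""
-- 		for j in l_name:
-- 			if j=='+':
-- 				break
-- 			if j is not '.':
-- 				e_l+=j
-- 		f="@".join([e_l,domain])
-- 		d[f]+=1
-- 	c=0
-- 	for i in d:
-- 		if d[i]>1:
-- 			c+=1
-- 	return c
-- ===== SOURCE B (Python) =====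
-- def function(l):
--     keys = []
--     for s in l:
--         local, domain = s.split('@')
--         norm = []
--         for ch in local:
--             if ch == '+':
--                 break
--             if ch != '.':
--                 norm.append(ch)
--         keys.append(''.join(norm) + '@' + domain)
--     keys.sort()
--     count = 0
--     i = 0
--     n = len(keys)
--     while i < n:
--         j = i + 1
--         while j < n and keys[j] == keys[i]:
--             j += 1
--         if j - i >= 2:
--             count += 1
--         i = j
--     return count
-- ===== Notes on version B (the rewrite author's own statement) =====
-- stated objective: alternative
-- what changed: Replaces the hash-based counting dict plus a second filtering pass over it with sort-then-scan: the normalized keys are sorted once and a single scan over adjacent runs counts the runs of length >= 2.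
import Mathlib
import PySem

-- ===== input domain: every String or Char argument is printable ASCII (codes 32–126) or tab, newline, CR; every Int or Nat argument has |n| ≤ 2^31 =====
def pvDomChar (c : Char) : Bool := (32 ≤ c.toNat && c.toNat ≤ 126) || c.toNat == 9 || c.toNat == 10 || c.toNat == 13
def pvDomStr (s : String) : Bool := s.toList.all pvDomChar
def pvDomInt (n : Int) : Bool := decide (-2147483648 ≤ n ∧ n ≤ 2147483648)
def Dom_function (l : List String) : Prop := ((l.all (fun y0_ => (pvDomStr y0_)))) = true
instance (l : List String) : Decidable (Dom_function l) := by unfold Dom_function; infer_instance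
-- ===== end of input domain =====

-- B replaces A's counting dict + second filtering pass by sorting the normalized keys once
-- and counting adjacent runs of length ≥ 2 in one scan; objective: alternative algorithm.

-- ===== PORT A =====
-- inner loop of both Pythons (identical char loop in A and B): keep chars of the local part
-- before the first '+', dropping '.' ('j is not "."' on interned 1-char ASCII strings = '!=')
def function_norm : List Char → List Char
  | [] => []
  | j :: rest =>
    if j = '+' then []
    else if j ≠ '.' then j :: function_norm rest
    else function_norm rest

-- l_name,domain = i.split('@'); f = "@".join([e_l, domain]).  The '_' branch is
-- unreachable under Pre_function (Python raises ValueError there).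
def function_key (i : String) : String :=
  match PySem.Str.split? i "@" with
  | some [lname, domain] => PySem.Str.join "@" [String.ofList (function_norm lname.toList), domain]
  | _ => i

def function (l : List String) : Int :=
  let d : PySem.Dict String Int :=
    l.foldl (fun d i => d.insert (function_key i) (d.getD (function_key i) 0 + 1)) PySem.Dict.empty
  d.keys.foldl (fun c i => if d.getD i 0 > 1 then c + 1 else c) 0

-- ===== PORT B =====
-- keys.append(''.join(norm) + '@' + domain)  (same char-level normalization loop as A)
def function_altKey (s : String) : String :=
  match PySem.Str.split? s "@" with
  | some [localPart, domain] => String.ofList (function_norm localPart.toList ++ '@' :: domain.toList)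
  | _ => s

-- the index scan 'i / j' over the sorted keys, as recursion on the remaining suffix:
-- the inner while advances j over the run of keys equal to keys[i]
def function_alt_scan : List String → Int
  | [] => 0
  | x :: rest =>
    (if 1 ≤ (rest.takeWhile (fun y => y == x)).length then 1 else 0)
      + function_alt_scan (rest.dropWhile (fun y => y == x))
  termination_by ms => ms.length
  decreasing_by
    exact Nat.lt_succ_of_le (List.length_dropWhile_le _ _)

def function_alt (l : List String) : Int :=
  function_alt_scan (PySem.List.sorted (l.map function_altKey) (fun x => x) false)

-- ===== PRECONDITION & SPEC =====
-- Pre_ excludes exactly the strings without exactly one '@': there i.split('@')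
-- cannot be unpacked into two names and both Pythons raise ValueError.
def Pre_function (l : List String) : Prop :=
  ∀ s ∈ l, ((PySem.Str.split? s "@").getD []).length = 2
instance (l : List String) : Decidable (Pre_function l) := by unfold Pre_function; infer_instance
def pvWitness_function : List String := ["a.b+c@x", "ab@x", "ab@y"]
def Spec_function (l : List String) (out : Int) : Prop := out = function_alt l
instance (l : List String) (out : Int) : Decidable (Spec_function l out) := by unfold Spec_function; infer_instance

-- ===== CLAIM (what is proved, stated in full; the proofs are below) =====
def Claim_equal_function : Prop := ∀ (l : List String), Dom_function l → Pre_function l → Spec_function l (function l)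

-- ===== LEMMAS AND PROOFS =====

-- the two key expressions build the same string
theorem function_key_eq (s : String) : function_key s = function_altKey s := by
  unfold function_key function_altKey
  cases h : PySem.Str.split? s "@" with
  | none => rfl
  | some parts =>
    match parts with
    | [] => rfl
    | [a] => rfl
    | [a, b] =>
      simp only
      apply String.toList_inj.mp
      simp [PySem.Str.toList_join, PySem.Chars.join_cons_cons, PySem.Chars.join_singleton,
        String.toList_ofList]
    | a :: b :: c :: r => rfl

-- A's dict is the counter of the normalized keys
theorem function_dict_eq (l : List String) :
    l.foldl (fun d i => d.insert (function_key i) (d.getD (function_key i) 0 + 1))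
      (PySem.Dict.empty : PySem.Dict String Int)
      = PySem.Dict.counter (l.map function_altKey) := by
  rw [← PySem.Dict.foldl_insert_getD_add_one_eq_counter, List.foldl_map]
  simp [function_key_eq]

-- A = number of distinct normalized keys occurring more than once
theorem function_eq_countP (l : List String) :
    function l = ((PySem.Set.ofList (l.map function_altKey)).countP
      (fun x => decide (2 ≤ (l.map function_altKey).count x)) : Int) := by
  unfold function
  simp only []
  rw [function_dict_eq, PySem.Dict.keys_counter]
  have hif : ∀ (c : Int) (i : String),
      (if ((l.map function_altKey).count i : Int) > 1 then c + 1 else c)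
        = (if (fun x => decide (2 ≤ (l.map function_altKey).count x)) i = true then c + 1 else c) := by
    intro c i
    by_cases h : 2 ≤ (l.map function_altKey).count i
    · rw [if_pos (by omega), if_pos (by simp [h])]
    · rw [if_neg (by omega), if_neg (by simp [h])]
  have h1 : ∀ (a : Int) (ks : List String),
      ks.foldl (fun c i => if ((l.map function_altKey).count i : Int) > 1 then c + 1 else c) a
        = ks.foldl (fun c i => if (fun x => decide (2 ≤ (l.map function_altKey).count x)) i = true then c + 1 else c) a := by
    intro a ks
    induction ks generalizing a with
    | nil => rfl
    | cons x xs ih =>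
      simp only [List.foldl_cons]
      rw [hif, ih]
  simp only [PySem.Dict.getD_counter]
  rw [h1, PySem.List.foldl_count_if]
  simp

-- the run scan on a sorted (Pairwise ≤) list counts the distinct elements of count ≥ 2
theorem function_alt_scan_sorted (n : ℕ) (ms : List String) (hn : ms.length ≤ n)
    (h : ms.Pairwise (· ≤ ·)) :
    function_alt_scan ms = ((PySem.Set.ofList ms).countP
      (fun x => decide (2 ≤ ms.count x)) : Int) := by
  induction n generalizing ms with
  | zero =>
    have : ms = [] := List.length_eq_zero_iff.mp (Nat.le_zero.mp hn)
    subst this; simp [function_alt_scan]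
  | succ n ih =>
    cases ms with
    | nil => simp [function_alt_scan]
    | cons x rest =>
      have hsplit : rest = rest.takeWhile (fun y => y == x) ++ rest.dropWhile (fun y => y == x) :=
        (List.takeWhile_append_dropWhile).symm
      set t := rest.takeWhile (fun y => y == x) with ht
      set d := rest.dropWhile (fun y => y == x) with hd
      -- every element of t equals x
      have htx : ∀ y ∈ t, y = x := by
        intro y hy
        have := List.mem_takeWhile_imp hy
        simpa using this
      -- x is not in d
      have hxd : x ∉ d := by
        intro hxmem
        cases hdd : d with
        | nil => simp [hdd] at hxmem
        | cons h0 d' =>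
          have hh0 : ¬ ((h0 == x) = true) := by
            have := List.head?_dropWhile_not (fun y => y == x) rest
            rw [← hd, hdd] at this
            simpa using this
          have hh0x : h0 ≠ x := by simpa using hh0
          -- pairwise order: x ≤ h0 and (pairwise within d) h0 ≤ every later element
          have hrest : ∀ y ∈ rest, x ≤ y := (List.pairwise_cons.mp h).1
          have hxh0 : x ≤ h0 := hrest h0 (by rw [hsplit, hdd]; exact List.mem_append_right _ (by simp))
          have hdp : d.Pairwise (· ≤ ·) := by
            have := (List.pairwise_cons.mp h).2
            rw [hsplit] at this
            exact this.sublist (List.sublist_append_right _ _)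
          rw [hdd] at hxmem
          rcases List.mem_cons.mp hxmem with hxe | hxmem'
          · exact hh0x hxe.symm
          · have : h0 ≤ x := by
              rw [hdd] at hdp
              exact (List.pairwise_cons.mp hdp).1 x hxmem'
            exact hh0x (le_antisymm this hxh0)
      -- counts
      have hcx : (x :: rest).count x = 1 + t.length := by
        rw [List.count_cons_self, hsplit, List.count_append]
        have h1 : t.count x = t.length := List.count_eq_length.mpr (by
          intro y hy; have := htx y hy; simp [this])
        have h2 : d.count x = 0 := List.count_eq_zero.mpr hxd
        omega
      have hcy : ∀ y, y ≠ x → (x :: rest).count y = d.count y := by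
        intro y hyx
        rw [List.count_cons, hsplit, List.count_append]
        have h0 : t.count y = 0 := List.count_eq_zero.mpr (fun hmem => hyx (htx y hmem))
        have h1 : (x == y) = false := by simpa using (Ne.symm hyx)
        rw [h0, h1]
        simp
      -- Set.ofList (x :: rest) is a permutation of x :: Set.ofList d
      have hperm : (PySem.Set.ofList (x :: rest)).Perm (x :: PySem.Set.ofList d) := by
        rw [List.perm_ext_iff_of_nodup (PySem.Set.nodup_ofList _)
          (by exact List.nodup_cons.mpr ⟨by simpa [PySem.Set.mem_ofList] using hxd,
            PySem.Set.nodup_ofList _⟩)]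
        intro y
        simp only [PySem.Set.mem_ofList, List.mem_cons]
        constructor
        · rintro (rfl | hy)
          · exact Or.inl rfl
          · rw [hsplit] at hy
            rcases List.mem_append.mp hy with hy | hy
            · exact Or.inl (htx y hy)
            · exact Or.inr hy
        · rintro (rfl | hy)
          · exact Or.inl rfl
          · exact Or.inr (by rw [hsplit]; exact List.mem_append_right _ hy)
      -- d is sorted, and shorter
      have hdp : d.Pairwise (· ≤ ·) := by
        have := (List.pairwise_cons.mp h).2
        rw [hsplit] at this
        exact this.sublist (List.sublist_append_right _ _)
      have hdn : d.length ≤ n := by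
        have h1 : d.length ≤ rest.length := List.length_dropWhile_le _ _
        have h2 : rest.length + 1 ≤ n + 1 := hn
        omega
      -- assemble
      rw [function_alt_scan]
      rw [ih d hdn hdp]
      rw [hperm.countP_eq]
      rw [List.countP_cons]
      have hcongr : (PySem.Set.ofList d).countP (fun y => decide (2 ≤ d.count y))
          = (PySem.Set.ofList d).countP (fun y => decide (2 ≤ (x :: rest).count y)) := by
        apply List.countP_congr
        intro y hy
        have hyx : y ≠ x := by
          intro hxe; subst hxe
          exact hxd ((PySem.Set.mem_ofList _ _).mp hy)
        rw [hcy y hyx]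
      rw [hcongr]
      have hpx : (decide (2 ≤ (x :: rest).count x) = true) ↔ 1 ≤ t.length := by
        rw [hcx]; simp; omega
      by_cases hT : 1 ≤ t.length
      · rw [if_pos hT, if_pos (hpx.mpr hT)]
        push_cast
        ring
      · rw [if_neg hT, if_neg (by intro hc; exact hT (hpx.mp hc))]
        push_cast
        ring

-- B = the same count
theorem function_alt_eq_countP (l : List String) :
    function_alt l = ((PySem.Set.ofList (l.map function_altKey)).countP
      (fun x => decide (2 ≤ (l.map function_altKey).count x)) : Int) := by
  unfold function_alt
  set ks := l.map function_altKey with hks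
  set sk := PySem.List.sorted ks (fun x => x) false with hsk
  have hperm : sk.Perm ks := PySem.List.sorted_perm ks _ false
  have hpair : sk.Pairwise (· ≤ ·) := by
    have := PySem.List.sorted_pairwise (xs := ks) (key := fun x => x)
    simpa using this
  rw [function_alt_scan_sorted sk.length sk le_rfl hpair]
  have hcnt : ∀ x, sk.count x = ks.count x := fun x => hperm.count_eq x
  have hmemperm : (PySem.Set.ofList sk).Perm (PySem.Set.ofList ks) := by
    rw [List.perm_ext_iff_of_nodup (PySem.Set.nodup_ofList _) (PySem.Set.nodup_ofList _)]
    intro y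
    rw [PySem.Set.mem_ofList, PySem.Set.mem_ofList]
    exact ⟨fun hy => hperm.mem_iff.mp hy, fun hy => hperm.mem_iff.mpr hy⟩
  congr 1
  rw [hmemperm.countP_eq]
  apply List.countP_congr
  intro y _
  rw [hcnt y]

-- ===== VERDICT (by name: the statement is the Claim_ definition above) =====
theorem function_spec : Claim_equal_function := by
  intro l _ _
  unfold Spec_function
  rw [function_eq_countP, function_alt_eq_countP]
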